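-- pv_equiv track=rewrite | github.com/Princeton-SysML/kNNLM_privacy | eval_utils.py | count_max_same_seq
-- ===== SOURCE A (Python) =====
-- def count_max_same_seq(sent):
--     token_list = sent.split(" ")
--     max_same = 1
--     tmp_max = 1
--     last_t = token_list[0]
--     for t in token_list[1:]:
--         if t == last_t:
--             tmp_max += 1
--             if tmp_max > max_same:
--                 max_same = tmp_max
--         else:
--             if tmp_max > max_same:
--                 max_same = tmp_max
--             tmp_max = 1
--         last_t = t
--     return max_same
-- ===== SOURCE B (Python) =====
-- def count_max_same_seq(sent):
--     tokens = sent.split(" ")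
--     # run boundaries: positions j where the token differs from its predecessor
--     cuts = [j for j, (a, b) in enumerate(zip(tokens, tokens[1:]), 1) if a != b]
--     # the answer is the widest gap between consecutive boundaries (0 and len added)
--     return max(hi - lo for lo, hi in zip([0] + cuts, cuts + [len(tokens)]))
-- ===== Notes on version B (the rewrite author's own statement) =====
-- stated objective: alternative
-- what changed: Replaces A's single-pass running-max/counter state machine with a boundary/gap algorithm: it records the positions where a token differs from its predecessor and returns the widest gap between consecutive boundaries (with 0 and len(tokens) added).
import Mathlib
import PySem

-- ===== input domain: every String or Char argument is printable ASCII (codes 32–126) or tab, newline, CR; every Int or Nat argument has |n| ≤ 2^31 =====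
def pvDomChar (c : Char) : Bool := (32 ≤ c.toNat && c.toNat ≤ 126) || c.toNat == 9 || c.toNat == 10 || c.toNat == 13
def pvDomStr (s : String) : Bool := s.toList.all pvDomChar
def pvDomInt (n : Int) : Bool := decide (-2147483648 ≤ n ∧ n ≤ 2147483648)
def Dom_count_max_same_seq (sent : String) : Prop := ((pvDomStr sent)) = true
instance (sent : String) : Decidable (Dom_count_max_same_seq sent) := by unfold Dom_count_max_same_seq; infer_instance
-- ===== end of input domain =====

-- B replaces A's running-max/counter state machine with a boundary/gap algorithm:
-- record the positions where the token differs from its predecessor, then take the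
-- widest gap between consecutive boundaries; objective: alternative (same O(n) cost).

-- ===== PORT A =====
-- one loop step of A: state is (max_same, tmp_max, last_t)
def cmsStep (st : Int × Int × String) (t : String) : Int × Int × String :=
  if t == st.2.2 then
    let c := st.2.1 + 1
    (if c > st.1 then c else st.1, c, t)
  else
    ((if st.2.1 > st.1 then st.2.1 else st.1), 1, t)

def count_max_same_seq (sent : String) : Int :=
  let token_list := (PySem.Str.split? sent " ").getD []   -- sent.split(" "); sep ≠ "" so always some
  match token_list with
  | [] => 1   -- unreachable: split(" ") always yields at least one piece (token_list[0] exists)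
  | last_t :: rest => (rest.foldl cmsStep (1, 1, last_t)).1

-- ===== PORT B =====
def count_max_same_seq_alt (sent : String) : Int :=
  let tokens := (PySem.Str.split? sent " ").getD []            -- sent.split(" ")
  -- cuts = [j for j, (a, b) in enumerate(zip(tokens, tokens[1:]), 1) if a != b]
  let cuts : List Int :=
    ((PySem.List.enumerate (tokens.zip (PySem.List.slice tokens (some 1) none)) 1).filter
        (fun p => !(p.2.1 == p.2.2))).map (·.1)
  -- gaps between consecutive boundaries: zip([0] + cuts, cuts + [len(tokens)])
  let gaps := (([0] ++ cuts).zip (cuts ++ [(tokens.length : Int)])).map (fun p : Int × Int => p.2 - p.1)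
  -- max(hi - lo for lo, hi in zip(...)); the zip is never empty (tokens is nonempty)
  match gaps with
  | [] => 1   -- unreachable
  | g :: gs => gs.foldl max g

-- ===== PRECONDITION & SPEC =====
def Spec_count_max_same_seq (sent : String) (out : Int) : Prop := out = count_max_same_seq_alt sent
instance (sent : String) (out : Int) : Decidable (Spec_count_max_same_seq sent out) := by unfold Spec_count_max_same_seq; infer_instance

-- ===== CLAIM (what is proved, stated in full; the proofs are below) =====
def Claim_equal_count_max_same_seq : Prop := ∀ (sent : String), Dom_count_max_same_seq sent → Spec_count_max_same_seq sent (count_max_same_seq sent)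

-- ===== LEMMAS AND PROOFS =====

-- split(" ") never yields the empty list
theorem splitOn_go_ne_nil (sep : List Char) : ∀ fuel l cur acc, PySem.Chars.splitOn.go sep fuel l cur acc ≠ [] := by
  intro fuel
  induction fuel with
  | zero => intro l cur acc; simp [PySem.Chars.splitOn.go]
  | succ n ih =>
      intro l cur acc
      cases l with
      | nil => simp [PySem.Chars.splitOn.go]
      | cons c rest =>
          rw [PySem.Chars.splitOn.go]
          split_ifs with h
          · exact ih _ _ _
          · exact ih _ _ _

theorem split_getD_ne_nil (sent : String) : (PySem.Str.split? sent " ").getD [] ≠ [] := by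
  simp [PySem.Str.split?, PySem.Chars.split?, PySem.Chars.splitOn, splitOn_go_ne_nil]

-- the list of run lengths of a token list (reference object both sides are reduced to)
def cmsRuns : List String → List Int
  | [] => []
  | x :: xs =>
      ((xs.takeWhile (· == x)).length + 1 : Int) :: cmsRuns (xs.dropWhile (· == x))
  termination_by l => l.length
  decreasing_by
    simpa using Nat.lt_succ_of_le (List.length_dropWhile_le (· == x) xs)

-- ---- A side: the fold of cmsStep computes the max of the run lengths ----
-- proof-side view of A's scan: a single pass carrying the current key and count
def cmsGo (k : String) (n : Int) : List String → List Int
  | [] => [n]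
  | t :: ts => if t == k then cmsGo k (n + 1) ts else n :: cmsGo t 1 ts

theorem foldl_max_max (L : List Int) : ∀ (m a : Int), L.foldl max (max m a) = max (L.foldl max m) a := by
  induction L with
  | nil => intro m a; rfl
  | cons b L ih =>
      intro m a
      simp only [List.foldl_cons]
      rw [show max (max m a) b = max (max m b) a by omega, ih]

theorem cmsGo_eq_runs (ts : List String) : ∀ (k : String) (n : Int),
    cmsGo k n ts = (n + ((ts.takeWhile (· == k)).length : Int)) :: cmsRuns (ts.dropWhile (· == k)) := by
  induction ts with
  | nil => intro k n; simp [cmsGo, cmsRuns]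
  | cons t ts ih =>
      intro k n
      by_cases h : t = k
      · subst h
        rw [show cmsGo t n (t :: ts) = cmsGo t (n + 1) ts by simp [cmsGo], ih t (n + 1)]
        simp
        ring_nf
      · rw [show cmsGo k n (t :: ts) = n :: cmsGo t 1 ts by simp [cmsGo, h], ih t 1]
        have hb : (t == k) = false := by simp [h]
        simp [hb, cmsRuns]
        ring_nf

theorem cmsGo_foldl_max_bounds (ts : List String) : ∀ (k : String) (n m : Int),
    n ≤ (cmsGo k n ts).foldl max m ∧ m ≤ (cmsGo k n ts).foldl max m := by
  induction ts with
  | nil => intro k n m; simp [cmsGo]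
  | cons t ts ih =>
      intro k n m
      by_cases h : t = k
      · have := ih k (n + 1) m
        simp [cmsGo, h] at this ⊢
        omega
      · have := ih t 1 (max m n)
        simp [cmsGo, h] at this ⊢
        omega

theorem cmsFold_eq (rest : List String) : ∀ (m c : Int) (last : String),
    1 ≤ c → c ≤ m →
    (rest.foldl cmsStep (m, c, last)).1 = (cmsGo last c rest).foldl max m := by
  induction rest with
  | nil => intro m c last h1 h2; simp [cmsGo]; omega
  | cons t ts ih =>
      intro m c last h1 h2
      rw [List.foldl_cons]
      by_cases h : t = last
      · subst h
        have hstep : cmsStep (m, c, t) t = (max m (c + 1), c + 1, t) := by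
          simp only [cmsStep, beq_self_eq_true, if_true]
          rw [show (if c + 1 > m then c + 1 else m) = max m (c + 1) by split_ifs <;> omega]
        rw [hstep, ih _ _ _ (by omega) (by omega)]
        rw [show cmsGo t c (t :: ts) = cmsGo t (c + 1) ts by simp [cmsGo]]
        rw [foldl_max_max]
        have hb := (cmsGo_foldl_max_bounds ts t (c + 1) m).1
        omega
      · have hstep : cmsStep (m, c, last) t = (m, 1, t) := by
          have hb : (t == last) = false := by simp [h]
          simp only [cmsStep, hb, Bool.false_eq_true, if_false]
          rw [show (if c > m then c else m) = m by split_ifs <;> omega]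
        rw [hstep, ih m 1 t (by omega) (by omega)]
        rw [show cmsGo last c (t :: ts) = c :: cmsGo t 1 ts by simp [cmsGo, h]]
        rw [List.foldl_cons, show max m c = m by omega]

-- ---- B side: the boundary positions and their gaps compute the run lengths ----
-- proof-side view of B's cuts: the change positions, prev held explicitly
def chg (k : Int) (prev : String) : List String → List Int
  | [] => []
  | t :: ts => if prev == t then chg (k + 1) t ts else k :: chg (k + 1) t ts

theorem cuts_eq_chg (xs : List String) : ∀ (x : String) (k : Int),
    ((PySem.List.enumerate ((x :: xs).zip xs) k).filter (fun p => !(p.2.1 == p.2.2))).map (·.1)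
      = chg k x xs := by
  induction xs with
  | nil => intro x k; simp [chg, PySem.List.enumerate_nil]
  | cons y ys ih =>
      intro x k
      rw [show (x :: y :: ys).zip (y :: ys) = (x, y) :: (y :: ys).zip ys from rfl,
          PySem.List.enumerate_cons]
      by_cases h : x = y
      · simp [chg, h, ih]
      · have hb : (x == y) = false := by simp [h]
        simp [chg, hb, ih]

-- chg skips over a run of tokens equal to prev, advancing the position
theorem chg_skip_run (x : String) (rest : List String) : ∀ (run : List String) (k : Int),
    (∀ r ∈ run, r = x) → chg k x (run ++ rest) = chg (k + (run.length : Int)) x rest := by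
  intro run
  induction run with
  | nil => intro k _; simp
  | cons r rs ih =>
      intro k hall
      have hr : r = x := hall r (by simp)
      subst hr
      rw [show (r :: rs) ++ rest = r :: (rs ++ rest) from rfl,
          show chg k r (r :: (rs ++ rest)) = chg (k + 1) r (rs ++ rest) by simp [chg]]
      rw [ih (k + 1) (fun s hs => hall s (by simp [hs]))]
      congr 1
      push_cast [List.length_cons]
      ring

theorem gaps_eq_runs (m : Nat) : ∀ (xs : List String) (x : String) (a : Int), xs.length ≤ m →
    ((a :: chg (a + 1) x xs).zip (chg (a + 1) x xs ++ [a + 1 + (xs.length : Int)])).map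
        (fun p => p.2 - p.1)
      = cmsRuns (x :: xs) := by
  induction m with
  | zero =>
      intro xs x a hm
      have hxs : xs = [] := List.length_eq_zero_iff.mp (Nat.le_zero.mp hm)
      subst hxs
      simp [chg, cmsRuns]
  | succ n ih =>
      intro xs x a hm
      have hsplit : xs.takeWhile (· == x) ++ xs.dropWhile (· == x) = xs :=
        List.takeWhile_append_dropWhile
      have hall : ∀ r ∈ xs.takeWhile (· == x), r = x := by
        intro r hr
        have := List.mem_takeWhile_imp hr
        simpa using this
      have hchg : chg (a + 1) x xs
          = chg (a + 1 + ((xs.takeWhile (· == x)).length : Int)) x (xs.dropWhile (· == x)) := by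
        conv_lhs => rw [← hsplit]
        exact chg_skip_run x _ _ _ hall
      cases hdw : xs.dropWhile (· == x) with
      | nil =>
          have hl := congrArg List.length hsplit
          rw [hdw] at hl
          simp at hl
          rw [hchg, hdw, cmsRuns, hdw]
          simp [chg, cmsRuns]
          omega
      | cons y ys =>
          have hlen : xs.length = (xs.takeWhile (· == x)).length + 1 + ys.length := by
            have := congrArg List.length hsplit
            simp [hdw] at this
            omega
          have hy : (x == y) = false := by
            have h1 : xs.dropWhile (· == x) ≠ [] := by simp [hdw]
            have h2 := List.head_dropWhile_not (· == x) h1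
            have h3 : (xs.dropWhile (· == x)).head h1 = y := by simp [hdw]
            rw [h3] at h2
            simp at h2 ⊢
            exact fun he => h2 he.symm
          rw [hchg, hdw,
              show chg (a + 1 + ((xs.takeWhile (· == x)).length : Int)) x (y :: ys)
                = (a + 1 + ((xs.takeWhile (· == x)).length : Int))
                  :: chg (a + 1 + ((xs.takeWhile (· == x)).length : Int) + 1) y ys by
                simp [chg, hy]]
          rw [show (a + 1 + (xs.length : Int))
              = (a + 1 + ((xs.takeWhile (· == x)).length : Int)) + 1 + (ys.length : Int) by
                rw [hlen]; push_cast; ring]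
          rw [show ∀ (c : Int) (t : List Int) (e : Int),
                ((a :: c :: t).zip ((c :: t) ++ [e])).map (fun p => p.2 - p.1)
                  = (c - a) :: ((c :: t).zip (t ++ [e])).map (fun p => p.2 - p.1) from
              fun c t e => rfl]
          rw [ih ys y _ (by omega)]
          conv_rhs => rw [cmsRuns]
          rw [hdw]
          congr 1
          ring

-- ===== VERDICT (by name: the statement is the Claim_ definition above) =====
theorem count_max_same_seq_spec : Claim_equal_count_max_same_seq := by
  intro sent _
  unfold Spec_count_max_same_seq count_max_same_seq count_max_same_seq_alt
  cases htl : (PySem.Str.split? sent " ").getD [] with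
  | nil => exact absurd htl (split_getD_ne_nil sent)
  | cons x xs =>
      simp only []
      -- A side: the fold computes max over the run lengths
      rw [cmsFold_eq xs 1 1 x le_rfl le_rfl, cmsGo_eq_runs]
      -- B side: tokens[1:] is the tail, cuts are the change positions, gaps the run lengths
      rw [PySem.List.slice_from_one, List.tail_cons, List.singleton_append, cuts_eq_chg,
          show (1 : Int) = 0 + 1 from rfl,
          show ((x :: xs).length : Int) = 0 + 1 + (xs.length : Int) by push_cast [List.length_cons]; ring,
          gaps_eq_runs xs.length xs x 0 le_rfl, cmsRuns]
      simp only [List.foldl_cons]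
      congr 1
      omega
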